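-- pv_equiv track=rewrite | github.com/mouseroser/wemedia-skill | agents/notebooklm/scripts/analyze_similarity.py | parse_markdown_file
-- ===== SOURCE A (Python) =====
-- def parse_markdown_file(content):
--     """Parse the combined markdown file into individual documents"""
--     docs = []
--     current_doc = None
--     current_content = []
--
--     for line in content.split('\n'):
--         if line.startswith('# File:'):
--             if current_doc:
--                 docs.append({
--                     'path': current_doc,
--                     'content': '\n'.join(current_content).strip()
--                 })
--             current_doc = line.replace('# File:', '').strip()
--             current_content = []
--         elif current_doc:
--             current_content.append(line)
--
--     if current_doc:
--         docs.append({
--             'path': current_doc,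
--             'content': '\n'.join(current_content).strip()
--         })
--
--     return docs
-- ===== SOURCE B (Python) =====
-- def parse_markdown_file(content):
--     """Parse the combined markdown file into individual documents"""
--     lines = content.split('\n')
--     is_header = lambda l: l.startswith('# File:')
--     docs = []
--     i = 0
--     n = len(lines)
--     while i < n and not is_header(lines[i]):
--         i += 1
--     while i < n:
--         path = lines[i].replace('# File:', '').strip()
--         j = i + 1
--         while j < n and not is_header(lines[j]):
--             j += 1
--         if path:
--             docs.append({'path': path,
--                          'content': '\n'.join(lines[i + 1:j]).strip()})
--         i = j
--     return docs
-- ===== Notes on version B (the rewrite author's own statement) =====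
-- stated objective: alternative
-- what changed: Replaced A's one-pass state machine with current_doc/current_content accumulators by a forward index scan that locates each '# File:' header and slices the span of body lines up to the next header.
import Mathlib
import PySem

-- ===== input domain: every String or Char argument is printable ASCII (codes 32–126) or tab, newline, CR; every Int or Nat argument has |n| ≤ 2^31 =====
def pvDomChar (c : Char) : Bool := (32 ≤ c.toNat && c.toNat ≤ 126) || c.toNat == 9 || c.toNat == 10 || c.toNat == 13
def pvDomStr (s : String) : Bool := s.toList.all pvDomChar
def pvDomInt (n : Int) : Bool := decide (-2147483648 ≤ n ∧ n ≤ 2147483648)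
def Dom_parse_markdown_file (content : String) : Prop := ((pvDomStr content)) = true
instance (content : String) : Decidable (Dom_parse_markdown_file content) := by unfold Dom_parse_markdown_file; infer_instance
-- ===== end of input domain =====

-- B replaces A's one-pass state machine (current_doc/current_content accumulators) with a
-- forward scan that finds each '# File:' header and takes the span of body lines up to the
-- next header; same return value, objective: alternative decomposition (no speed claim).

-- ===== PORT A =====
-- loop body of A's 'for line in content.split('\n')'; state = (docs, current_doc, current_content)
def pmfAStep (st : List (List (String × String)) × Option String × List String) (line : String) :
    List (List (String × String)) × Option String × List String :=
  if PySem.Str.startswith line "# File:" then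
    ((if st.2.1.getD "" ≠ "" then
        st.1 ++ [[("path", st.2.1.getD ""), ("content", PySem.Str.strip (PySem.Str.join "\n" st.2.2))]]
      else st.1),
     some (PySem.Str.strip (PySem.Str.replace line "# File:" "")), [])
  else if st.2.1.getD "" ≠ "" then (st.1, st.2.1, st.2.2 ++ [line])
  else st

def parse_markdown_file (content : String) : List (List (String × String)) :=
  -- split? is some: the separator "\n" is nonempty
  let st := ((PySem.Str.split? content "\n").getD []).foldl pmfAStep ([], none, [])
  if st.2.1.getD "" ≠ "" then
    st.1 ++ [[("path", st.2.1.getD ""), ("content", PySem.Str.strip (PySem.Str.join "\n" st.2.2))]]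
  else st.1

-- ===== PORT B =====
-- Source B's 'is_header' lambda
def pmfIsHeader (l : String) : Bool := PySem.Str.startswith l "# File:"

-- Source B's outer while loop: lines[i] is a header; the inner while loop scanning to the next
-- header is the takeWhile/dropWhile split of the remaining lines
def pmfParse : List String → List (List (String × String))
  | [] => []
  | l :: rest =>
    let path := PySem.Str.strip (PySem.Str.replace l "# File:" "")
    let body := rest.takeWhile (fun x => !pmfIsHeader x)
    let rest' := rest.dropWhile (fun x => !pmfIsHeader x)
    (if path ≠ "" then
       [[("path", path), ("content", PySem.Str.strip (PySem.Str.join "\n" body))]]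
     else []) ++ pmfParse rest'
termination_by l => l.length
decreasing_by
  simp only [List.length_cons]
  exact Nat.lt_succ_of_le (List.length_dropWhile_le _ _)

def parse_markdown_file_alt (content : String) : List (List (String × String)) :=
  -- first while loop of Source B: skip the preamble before the first header
  pmfParse (((PySem.Str.split? content "\n").getD []).dropWhile (fun x => !pmfIsHeader x))

-- ===== PRECONDITION & SPEC =====
def Spec_parse_markdown_file (content : String) (out : List (List (String × String))) : Prop := out = parse_markdown_file_alt content
instance (content : String) (out : List (List (String × String))) : Decidable (Spec_parse_markdown_file content out) := by unfold Spec_parse_markdown_file; infer_instance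

-- ===== CLAIM (what is proved, stated in full; the proofs are below) =====
def Claim_equal_parse_markdown_file : Prop := ∀ (content : String), Dom_parse_markdown_file content → Spec_parse_markdown_file content (parse_markdown_file content)

-- ===== LEMMAS AND PROOFS =====

-- proof-side abbreviations
def pmfEmit (p : String) (body : List String) : List (List (String × String)) :=
  if p ≠ "" then [[("path", p), ("content", PySem.Str.strip (PySem.Str.join "\n" body))]] else []

def pmfFinish (st : List (List (String × String)) × Option String × List String) :
    List (List (String × String)) :=
  if st.2.1.getD "" ≠ "" then
    st.1 ++ [[("path", st.2.1.getD ""), ("content", PySem.Str.strip (PySem.Str.join "\n" st.2.2))]]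
  else st.1

theorem pmfParse_cons (l : String) (rest : List String) :
    pmfParse (l :: rest) =
      pmfEmit (PySem.Str.strip (PySem.Str.replace l "# File:" ""))
        (rest.takeWhile (fun x => !pmfIsHeader x)) ++
      pmfParse (rest.dropWhile (fun x => !pmfIsHeader x)) := by
  rw [pmfParse, pmfEmit]

-- main invariant: from a state with an active current_doc p and collected body acc,
-- A's remaining fold (then flush) produces docs, then the doc for p, then B's parse of the rest
theorem pmfMain (ls : List String) :
    ∀ (docs : List (List (String × String))) (p : String) (acc : List String),
    pmfFinish (ls.foldl pmfAStep (docs, some p, acc)) =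
      docs ++ pmfEmit p (acc ++ ls.takeWhile (fun x => !pmfIsHeader x)) ++
        pmfParse (ls.dropWhile (fun x => !pmfIsHeader x)) := by
  induction ls with
  | nil =>
    intro docs p acc
    by_cases hp : p = "" <;> simp [pmfFinish, pmfEmit, pmfParse, hp]
  | cons l t ih =>
    intro docs p acc
    by_cases hl : pmfIsHeader l = true
    · have hstep : pmfAStep (docs, some p, acc) l =
          (docs ++ pmfEmit p acc,
           some (PySem.Str.strip (PySem.Str.replace l "# File:" "")), []) := by
        by_cases hp : p = "" <;>
          simp [pmfAStep, pmfEmit, pmfIsHeader] at hl ⊢ <;> simp [hl, hp]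
      rw [List.foldl_cons, hstep, ih]
      simp [hl, pmfParse_cons]
    · rw [List.takeWhile_cons, List.dropWhile_cons]
      simp only [hl]
      by_cases hp : p = ""
      · have hstep : pmfAStep (docs, some p, acc) l = (docs, some p, acc) := by
          simp [pmfAStep, pmfIsHeader] at hl ⊢; simp [hl, hp]
        rw [List.foldl_cons, hstep, ih]
        simp [pmfEmit, hp]
      · have hstep : pmfAStep (docs, some p, acc) l = (docs, some p, acc ++ [l]) := by
          simp [pmfAStep, pmfIsHeader] at hl ⊢; simp [hl, hp]
        rw [List.foldl_cons, hstep, ih]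
        simp

-- from the initial state (no current_doc), A equals B's parse of the lines past the preamble
theorem pmfPre (ls : List String) :
    pmfFinish (ls.foldl pmfAStep ([], none, [])) =
      pmfParse (ls.dropWhile (fun x => !pmfIsHeader x)) := by
  induction ls with
  | nil => simp [pmfFinish, pmfParse]
  | cons l t ih =>
    by_cases hl : pmfIsHeader l = true
    · have hstep : pmfAStep ([], none, ([] : List String)) l =
          ([], some (PySem.Str.strip (PySem.Str.replace l "# File:" "")), []) := by
        simp [pmfAStep, pmfIsHeader] at hl ⊢; simp [hl]
      rw [List.foldl_cons, hstep, pmfMain]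
      simp [hl, pmfParse_cons]
    · have hstep : pmfAStep ([], none, ([] : List String)) l = ([], none, []) := by
        simp [pmfAStep, pmfIsHeader] at hl ⊢; simp [hl]
      rw [List.foldl_cons, hstep, List.dropWhile_cons]
      simp only [hl]
      exact ih

-- ===== VERDICT (by name: the statement is the Claim_ definition above) =====
theorem parse_markdown_file_spec : Claim_equal_parse_markdown_file := by
  intro content _
  show parse_markdown_file content = parse_markdown_file_alt content
  rw [parse_markdown_file, parse_markdown_file_alt]
  exact pmfPre _
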